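-- pv_equiv track=rewrite | github.com/MLegkovskis/Code-the-Curriculum | utils/math_helpers.py | get_simplification_steps
-- ===== SOURCE A (Python) =====
-- import math
--
-- def get_gcd(a, b):
--     """Return the greatest common divisor of a and b."""
--     return math.gcd(int(a), int(b))
--
-- def get_simplification_steps(n, d):
--     """Return a list of steps to simplify n/d."""
--     if d == 0:
--         return ["Denominator cannot be zero"]
--
--     n = int(n)
--     d = int(d)
--     steps = [f"{n}/{d}"]
--
--     gcd = get_gcd(n, d)
--     p = 2
--     while gcd > 1:
--         if gcd % p == 0:
--             n //= p
--             d //= p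
--             steps.append(f" \u2192 \u00F7{p} \u2192 {n}/{d}")
--             gcd //= p
--         elif p * p > gcd:
--             if gcd > 1:
--                 p = gcd
--         elif p == 2:
--             p = 3
--         else:
--             p += 2
--     if len(steps) == 1:
--         steps.append(" (already in simplest form)")
--     return steps
-- ===== SOURCE B (Python) =====
-- import math
--
-- def _primes_upto(m):
--     """All primes <= m, ascending: a candidate p is kept iff no q in [2, isqrt(p)] divides it."""
--     return [p for p in range(2, m + 1)
--             if all(p % q != 0 for q in range(2, math.isqrt(p) + 1))]
--
-- def get_simplification_steps(n, d):
--     """Return a list of steps to simplify n/d."""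
--     if d == 0:
--         return ["Denominator cannot be zero"]
--     n = int(n)
--     d = int(d)
--     steps = [f"{n}/{d}"]
--     g = math.gcd(n, d)
--     for p in _primes_upto(math.isqrt(g)):
--         while g % p == 0:
--             g //= p
--             n //= p
--             d //= p
--             steps.append(f" \u2192 \u00F7{p} \u2192 {n}/{d}")
--     if g > 1:
--         n //= g
--         d //= g
--         steps.append(f" \u2192 \u00F7{g} \u2192 {n}/{d}")
--     if len(steps) == 1:
--         steps.append(" (already in simplest form)")
--     return steps
-- ===== Notes on version B (the rewrite author's own statement) =====
-- stated objective: alternative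
-- what changed: B first enumerates the complete ascending list of primes up to isqrt(gcd(n,d)) with an independent primality filter, then makes one pass stripping each prime out fully and emits the leftover prime after the loop, instead of A's single while loop that interleaves a growing trial divisor (with odd-stepping and a shrinking p*p>gcd cutoff) with the divisions.
import Mathlib
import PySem

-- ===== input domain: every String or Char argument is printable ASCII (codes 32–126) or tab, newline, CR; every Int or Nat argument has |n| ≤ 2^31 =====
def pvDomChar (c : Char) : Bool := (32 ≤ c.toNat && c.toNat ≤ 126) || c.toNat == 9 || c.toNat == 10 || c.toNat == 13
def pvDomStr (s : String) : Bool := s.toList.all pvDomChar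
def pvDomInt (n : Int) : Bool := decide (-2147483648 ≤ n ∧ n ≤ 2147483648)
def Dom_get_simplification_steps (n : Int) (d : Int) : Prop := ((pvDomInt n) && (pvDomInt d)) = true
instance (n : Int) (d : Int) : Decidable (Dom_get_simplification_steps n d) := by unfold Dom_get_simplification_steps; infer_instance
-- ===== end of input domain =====

-- B replaces A's interleaved candidate-walk with a precomputed complete prime list up to isqrt(gcd),
-- one stripping pass per prime, and a leftover-prime step after the loop (objective: alternative).

-- ===== PORT A =====
-- get_gcd(a, b) = math.gcd(int(a), int(b))  (arguments are already ints at the call site)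
def get_gcd (a : Int) (b : Int) : Int := (Int.gcd a b : Int)

-- A's while loop, state (n, d, steps, gcd, p).  The extra Nat argument is FUEL — a
-- totality guard only: it is consumed once per iteration and the caller passes more
-- fuel than the loop can ever use (pvLoopA_canon below proves the bound), so the
-- fuel-exhausted branch is never reached on the calls the ports make.
def pvLoopA : Nat → Int → Int → List String → Int → Int → List String
  | 0, _, _, steps, _, _ => steps
  | fuel + 1, n, d, steps, g, p =>
    if 1 < g then
      if PySem.Int.mod g p = 0 then
        pvLoopA fuel (PySem.Int.floordiv n p) (PySem.Int.floordiv d p)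
          (steps ++ [" → ÷" ++ PySem.Int.toStr p ++ " → " ++
            PySem.Int.toStr (PySem.Int.floordiv n p) ++ "/" ++ PySem.Int.toStr (PySem.Int.floordiv d p)])
          (PySem.Int.floordiv g p) p
      else if p * p > g then
        -- Python: `if gcd > 1: p = gcd` — the inner guard is exactly the loop condition
        pvLoopA fuel n d steps g g
      else if p = 2 then
        pvLoopA fuel n d steps g 3
      else
        pvLoopA fuel n d steps g (p + 2)
    else steps

def get_simplification_steps (n : Int) (d : Int) : List String :=
  if d = 0 then ["Denominator cannot be zero"]
  else
    let steps : List String := [PySem.Int.toStr n ++ "/" ++ PySem.Int.toStr d]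
    let g := get_gcd n d
    let out := pvLoopA (5 * g.toNat + 2) n d steps g 2
    if out.length = 1 then out ++ [" (already in simplest form)"] else out

-- ===== PORT B =====
-- math.isqrt(x) for x ≥ 0 (B only applies it to nonnegative values, where it is exact)
def pvIsqrt (x : Int) : Int := (x.toNat.sqrt : Int)

-- _primes_upto(m): [p for p in range(2, m+1) if all(p % q != 0 for q in range(2, isqrt(p)+1))]
def pvPrimesUpto (m : Int) : List Int :=
  (PySem.List.pyRange 2 (m + 1) 1).filter (fun p =>
    (PySem.List.pyRange 2 (pvIsqrt p + 1) 1).all (fun q => PySem.Int.mod p q != 0))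

-- the inner `while g % p == 0` loop, state (g, n, d, steps); the Nat argument is fuel,
-- a totality guard exactly as in pvLoopA (the caller passes more than can ever be used)
def pvDivOut : Nat → Int → Int → Int → Int → List String → Int × Int × Int × List String
  | 0, g, n, d, _, steps => (g, n, d, steps)
  | fuel + 1, g, n, d, p, steps =>
    if PySem.Int.mod g p = 0 then
      pvDivOut fuel (PySem.Int.floordiv g p) (PySem.Int.floordiv n p) (PySem.Int.floordiv d p) p
        (steps ++ [" → ÷" ++ PySem.Int.toStr p ++ " → " ++
          PySem.Int.toStr (PySem.Int.floordiv n p) ++ "/" ++ PySem.Int.toStr (PySem.Int.floordiv d p)])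
    else (g, n, d, steps)

def get_simplification_steps_alt (n : Int) (d : Int) : List String :=
  if d = 0 then ["Denominator cannot be zero"]
  else
    let steps : List String := [PySem.Int.toStr n ++ "/" ++ PySem.Int.toStr d]
    let g : Int := (Int.gcd n d : Int)
    let st := (pvPrimesUpto (pvIsqrt g)).foldl
      (fun (s : Int × Int × Int × List String) p => pvDivOut (g.toNat + 1) s.1 s.2.1 s.2.2.1 p s.2.2.2)
      (g, n, d, steps)
    let st2 := if 1 < st.1 then
        (st.1, PySem.Int.floordiv st.2.1 st.1, PySem.Int.floordiv st.2.2.1 st.1,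
          st.2.2.2 ++ [" → ÷" ++ PySem.Int.toStr st.1 ++ " → " ++
            PySem.Int.toStr (PySem.Int.floordiv st.2.1 st.1) ++ "/" ++ PySem.Int.toStr (PySem.Int.floordiv st.2.2.1 st.1)])
      else st
    if st2.2.2.2.length = 1 then st2.2.2.2 ++ [" (already in simplest form)"] else st2.2.2.2

-- ===== PRECONDITION & SPEC =====
def Spec_get_simplification_steps (n : Int) (d : Int) (out : List String) : Prop := out = get_simplification_steps_alt n d
instance (n : Int) (d : Int) (out : List String) : Decidable (Spec_get_simplification_steps n d out) := by unfold Spec_get_simplification_steps; infer_instance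

-- ===== CLAIM (what is proved, stated in full; the proofs are below) =====
def Claim_equal_get_simplification_steps : Prop := ∀ (n : Int) (d : Int), Dom_get_simplification_steps n d → Spec_get_simplification_steps n d (get_simplification_steps n d)

-- ===== LEMMAS AND PROOFS =====

-- step-string rendering of a factor list (proof-side abstraction of both programs' appends)
def pvRender (n d : Int) (steps : List String) : List Int → List String
  | [] => steps
  | f :: fs =>
      pvRender (PySem.Int.floordiv n f) (PySem.Int.floordiv d f)
        (steps ++ [" → ÷" ++ PySem.Int.toStr f ++ " → " ++
          PySem.Int.toStr (PySem.Int.floordiv n f) ++ "/" ++ PySem.Int.toStr (PySem.Int.floordiv d f)]) fs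

def pvDivAll (x : Int) (l : List Int) : Int := l.foldl (fun a p => PySem.Int.floordiv a p) x

-- factor-level mirror of pvDivOut: factors of g stripped for candidate p, and the remaining g
def pvMultOut : Nat → Int → Int → List Int × Int
  | 0, g, _ => ([], g)
  | fuel + 1, g, p =>
    if PySem.Int.mod g p = 0 then
      (p :: (pvMultOut fuel (PySem.Int.floordiv g p) p).1, (pvMultOut fuel (PySem.Int.floordiv g p) p).2)
    else ([], g)

-- factor-level mirror of B's fold over the prime list
def pvPassL (F : Nat) : List Int → Int → List Int × Int
  | [], g => ([], g)
  | c :: cs, g =>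
    ((pvMultOut F g c).1 ++ (pvPassL F cs (pvMultOut F g c).2).1, (pvPassL F cs (pvMultOut F g c).2).2)

-- canonical ascending prime factorization (fuelled), the middle ground of both proofs
def pvMinFac (g : Int) : Int := (g.toNat.minFac : Int)

def pvCanon : Nat → Int → List Int
  | 0, _ => []
  | fc + 1, g => if 1 < g then pvMinFac g :: pvCanon fc (PySem.Int.floordiv g (pvMinFac g)) else []

-- invariant: g has no divisor in [2, p)
def pvNoSmall (g p : Int) : Prop := ∀ q : Int, 2 ≤ q → q < p → ¬ (q ∣ g)

-- "prime" as the invariants use it: at least 2 and no divisor in [2, q)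
def pvPrime (q : Int) : Prop := 2 ≤ q ∧ ∀ r : Int, 2 ≤ r → r < q → ¬ r ∣ q

-- fuel measure for A's loop
def pvTag (g p : Int) : Nat := if PySem.Int.mod g p = 0 then 0 else 1
def pvMA (g p : Int) : Nat := 4 * g.toNat + pvTag g p + (g - p).toNat

lemma pv_fd_lt (g p : Int) (hg : 0 < g) (hp : 2 ≤ p) :
    PySem.Int.floordiv g p < g ∧ 0 ≤ PySem.Int.floordiv g p := by
  have h2 : PySem.Int.floordiv g p = g / p := PySem.Int.floordiv_eq_ediv_of_pos (by omega)
  refine ⟨(PySem.Int.floordiv_lt_iff_lt_mul (by omega)).2 (by nlinarith), ?_⟩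
  rw [h2]; exact Int.ediv_nonneg (by omega) (by omega)

lemma pvNoSmall_div (g p : Int) (hm : PySem.Int.mod g p = 0) (h : pvNoSmall g p) :
    pvNoSmall (PySem.Int.floordiv g p) p := by
  intro q h2 hq hdvd
  have hg : PySem.Int.floordiv g p * p + PySem.Int.mod g p = g := PySem.Int.floordiv_mul_add_mod g p
  have he : g = PySem.Int.floordiv g p * p := by omega
  exact h q h2 hq (he ▸ hdvd.mul_right p)

-- g = p when p ∣ g, 1 < g, g < p*p and g has no factor below p
lemma pvEq_of_dvd_small (g p : Int) (hp : 2 ≤ p) (hg : 1 < g) (hdvd : p ∣ g)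
    (hsq : g < p * p) (hns : pvNoSmall g p) : g = p := by
  obtain ⟨m, hm⟩ := hdvd
  have hm1 : 1 ≤ m := by nlinarith
  have hmp : m < p := by nlinarith
  have h2 : ¬ (2 ≤ m) := fun h2 => hns m h2 hmp ⟨p, by rw [hm, mul_comm]⟩
  have : m = 1 := by omega
  simp [this] at hm; omega

lemma pvNoSmall_self (g p : Int) (hp : 2 ≤ p) (_hg : 1 < g) (_hnd : ¬ (p ∣ g))
    (hsq : g < p * p) (hns : pvNoSmall g p) : pvNoSmall g g := by
  intro q h2 hq hdvd
  by_cases hqp : q < p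
  · exact hns q h2 hqp hdvd
  · obtain ⟨m, hm⟩ := hdvd
    have hq0 : 0 < q := by omega
    have hm2 : 2 ≤ m := by nlinarith
    have hmp : m < p := by nlinarith
    exact hns m hm2 hmp ⟨q, by rw [hm, mul_comm]⟩

lemma pvFloordiv_self (p : Int) (hp : 0 < p) : PySem.Int.floordiv p p = 1 := by
  rw [PySem.Int.floordiv_eq_iff_of_pos hp]
  constructor <;> nlinarith

lemma pvParity (g p : Int) (hp : 2 ≤ p) (hodd : p = 2 ∨ p % 2 = 1) (_hg : 1 < g)
    (hnd : ¬ (p ∣ g)) (hns : pvNoSmall g p) : g = 2 ∨ g % 2 = 1 := by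
  rcases Int.emod_two_eq g with h | h
  · exfalso
    have h2 : (2:Int) ∣ g := Int.dvd_of_emod_eq_zero h
    rcases hodd with h2p | _
    · exact hnd (h2p ▸ h2)
    · by_cases hlt : 2 < p
      · exact hns 2 (by omega) hlt h2
      · have : p = 2 := by omega
        exact hnd (this ▸ h2)
  · exact Or.inr h

lemma pvDvd_iff (a b : Int) (ha : 0 ≤ a) (hb : 0 ≤ b) : a ∣ b ↔ a.toNat ∣ b.toNat := by
  rw [← Int.natCast_dvd_natCast, Int.toNat_of_nonneg ha, Int.toNat_of_nonneg hb]

-- the least factor of g is p when p divides g and nothing below p does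
lemma pvMinFac_eq (g p : Int) (hp : 2 ≤ p) (hg : 1 < g) (hdvd : p ∣ g) (hns : pvNoSmall g p) :
    pvMinFac g = p := by
  have hprime := Nat.minFac_prime (n := g.toNat) (by omega)
  have h2m : 2 ≤ g.toNat.minFac := hprime.two_le
  have hmd : ((g.toNat.minFac : Nat) : Int) ∣ g := by
    have h := Int.natCast_dvd_natCast.mpr (Nat.minFac_dvd g.toNat)
    rwa [Int.toNat_of_nonneg (by omega)] at h
  have hle : g.toNat.minFac ≤ p.toNat :=
    Nat.minFac_le_of_dvd (by omega) ((pvDvd_iff p g (by omega) (by omega)).mp hdvd)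
  have hge : ¬ ((g.toNat.minFac : Int) < p) := fun hlt => hns _ (by exact_mod_cast h2m) hlt hmd
  unfold pvMinFac; omega

-- g itself is its least factor when nothing below `bound` divides g and g < bound²
lemma pvMinFac_eq_self (g bound : Int) (hb : 0 ≤ bound) (hg : 1 < g) (hns : pvNoSmall g bound)
    (hsq : g < bound * bound) : pvMinFac g = g := by
  have hprime := Nat.minFac_prime (n := g.toNat) (by omega)
  have h2m : 2 ≤ g.toNat.minFac := hprime.two_le
  have hmdn : g.toNat.minFac ∣ g.toNat := Nat.minFac_dvd g.toNat
  have hmd : ((g.toNat.minFac : Nat) : Int) ∣ g := by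
    have h := Int.natCast_dvd_natCast.mpr hmdn
    rwa [Int.toNat_of_nonneg (by omega)] at h
  have hbm : bound ≤ (g.toNat.minFac : Int) := by
    by_contra hlt
    exact hns _ (by exact_mod_cast h2m) (by omega) hmd
  obtain ⟨k, hk⟩ := hmdn
  by_cases hk1 : k = 1
  · rw [hk1, Nat.mul_one] at hk
    unfold pvMinFac; omega
  · exfalso
    have hk2 : 2 ≤ k := by
      by_contra hlt
      have hk0 : k = 0 := by omega
      rw [hk0, Nat.mul_zero] at hk
      omega
    have hkd : ((k : Nat) : Int) ∣ g := by
      have h := Int.natCast_dvd_natCast.mpr (dvd_of_mul_left_eq g.toNat.minFac hk.symm)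
      rwa [Int.toNat_of_nonneg (by omega)] at h
    have hbk : bound ≤ (k : Int) := by
      by_contra hlt
      exact hns _ (by exact_mod_cast hk2) (by omega) hkd
    have h2 : (g.toNat : Int) = (g.toNat.minFac : Int) * (k : Int) := by exact_mod_cast hk
    have hgk : g = ((g.toNat.minFac : Int)) * (k : Int) := by
      rw [← h2, Int.toNat_of_nonneg (by omega)]
    have hmul : bound * bound ≤ ((g.toNat.minFac : Int)) * (k : Int) :=
      mul_le_mul hbm hbk hb (by positivity)
    linarith

-- every q ≥ 2 has a pvPrime divisor ≤ q
lemma pvExists_prime_dvd (q : Int) (h : 2 ≤ q) : ∃ r : Int, pvPrime r ∧ r ∣ q ∧ r ≤ q := by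
  have hprime := Nat.minFac_prime (n := q.toNat) (by omega)
  refine ⟨(q.toNat.minFac : Int), ⟨by exact_mod_cast hprime.two_le, ?_⟩, ?_, ?_⟩
  · intro r h2 hlt hdvd
    have hrd : r.toNat ∣ q.toNat.minFac :=
      (pvDvd_iff r _ (by omega) (by positivity)).mp hdvd
    rcases Nat.Prime.eq_one_or_self_of_dvd hprime _ hrd with h1 | h1 <;> omega
  · have hh := Int.natCast_dvd_natCast.mpr (Nat.minFac_dvd q.toNat)
    rwa [Int.toNat_of_nonneg (by omega)] at hh
  · have := Nat.minFac_le (n := q.toNat) (by omega)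
    omega

lemma pvCanon_nil (fc : Nat) (g : Int) (h : ¬ 1 < g) : pvCanon fc g = [] := by
  cases fc <;> simp [pvCanon, h]

lemma pvCanon_cons (fc : Nat) (g : Int) (h : 1 < g) :
    pvCanon (fc + 1) g = pvMinFac g :: pvCanon fc (PySem.Int.floordiv g (pvMinFac g)) := by
  simp [pvCanon, h]

lemma pvMinFac_two_le (g : Int) (h : 1 < g) : 2 ≤ pvMinFac g := by
  have := (Nat.minFac_prime (n := g.toNat) (by omega)).two_le
  unfold pvMinFac; omega

lemma pvCanon_congr : ∀ (f1 : Nat) (f2 : Nat) (g : Int), g.toNat < f1 → g.toNat < f2 →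
    pvCanon f1 g = pvCanon f2 g := by
  intro f1
  induction f1 with
  | zero => intro f2 g h1 _; omega
  | succ f1 ih =>
    intro f2 g h1 h2
    by_cases hg : 1 < g
    · rcases f2 with _ | f2
      · omega
      · rw [pvCanon_cons _ _ hg, pvCanon_cons _ _ hg]
        have h2m := pvMinFac_two_le g hg
        obtain ⟨hlt, hnn⟩ := pv_fd_lt g (pvMinFac g) (by omega) h2m
        rw [ih f2 _ (by omega) (by omega)]
    · rw [pvCanon_nil _ _ hg, pvCanon_nil _ _ hg]

lemma pvCanon_self (fc : Nat) (g : Int) (hg : 1 < g) (hm : pvMinFac g = g)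
    (hfc : g.toNat < fc) : pvCanon fc g = [g] := by
  rcases fc with _ | fc
  · omega
  · rw [pvCanon_cons _ _ hg, hm, pvFloordiv_self g (by omega),
      pvCanon_nil _ _ (by omega)]

-- the leftover after stripping everything below `bound`, with g < bound², is 1 or a single prime
lemma pvCanon_leftover (fc : Nat) (g bound : Int) (hb : 0 ≤ bound) (hns : pvNoSmall g bound)
    (hsq : g < bound * bound) (hfc : g.toNat < fc) :
    pvCanon fc g = if 1 < g then [g] else [] := by
  by_cases hg : 1 < g
  · rw [if_pos hg]
    exact pvCanon_self fc g hg (pvMinFac_eq_self g bound hb hg hns hsq) hfc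
  · rw [if_neg hg]; exact pvCanon_nil fc g hg

lemma pvRender_append (l1 : List Int) : ∀ (l2 : List Int) (n d : Int) (steps : List String),
    pvRender n d steps (l1 ++ l2) =
      pvRender (pvDivAll n l1) (pvDivAll d l1) (pvRender n d steps l1) l2 := by
  induction l1 with
  | nil => intro l2 n d steps; simp [pvRender, pvDivAll]
  | cons f fs ih => intro l2 n d steps; simpa [pvRender, pvDivAll] using ih l2 _ _ _

lemma pvLoopA_one (fa : Nat) (n d : Int) (steps : List String) (p : Int) :
    pvLoopA fa n d steps 1 p = steps := by
  cases fa <;> simp [pvLoopA]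

-- ===== A-side: A's loop renders the canonical factorization =====
lemma pvLoopA_canon : ∀ (fa : Nat) (g p n d : Int) (steps : List String) (fc : Nat),
    2 ≤ p → (p = 2 ∨ p % 2 = 1) → pvNoSmall g p → pvMA g p < fa → g.toNat < fc →
    pvLoopA fa n d steps g p = pvRender n d steps (pvCanon fc g) := by
  intro fa
  induction fa with
  | zero => intro g p n d steps fc _ _ _ hfa _; omega
  | succ fa ih =>
    intro g p n d steps fc hp hodd hns hfa hfc
    simp only [pvLoopA]
    by_cases hg : 1 < g
    · simp only [if_pos hg]
      by_cases hm : PySem.Int.mod g p = 0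
      · simp only [if_pos hm]
        have hdvd : p ∣ g := (PySem.Int.mod_eq_zero_iff_dvd g p).1 hm
        have hmf : pvMinFac g = p := pvMinFac_eq g p hp hg hdvd hns
        rcases fc with _ | fc
        · omega
        rw [pvCanon_cons _ _ hg, hmf]
        obtain ⟨hlt, hnn⟩ := pv_fd_lt g p (by omega) hp
        by_cases hsq : p * p > g
        · -- p ∣ g and p*p > g: with no smaller factor, g = p and one step finishes
          have heq : g = p := pvEq_of_dvd_small g p hp hg hdvd hsq hns
          have hfd : PySem.Int.floordiv g p = 1 := by rw [heq]; exact pvFloordiv_self p (by omega)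
          rw [hfd, pvLoopA_one, pvCanon_nil fc 1 (by omega)]
          simp [pvRender]
        · -- ordinary division step
          simp only [pvRender]
          have hMA : pvMA (PySem.Int.floordiv g p) p < pvMA g p := by
            unfold pvMA pvTag
            rw [if_pos hm]
            have : (if PySem.Int.mod (PySem.Int.floordiv g p) p = 0 then (0:Nat) else 1) ≤ 1 := by
              split <;> omega
            omega
          exact ih _ p _ _ _ fc hp hodd (pvNoSmall_div g p hm hns) (by omega) (by omega)
      · simp only [if_neg hm]
        have hnd : ¬ (p ∣ g) := fun hd => hm ((PySem.Int.mod_eq_zero_iff_dvd g p).2 hd)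
        by_cases hsq : p * p > g
        · -- p := g; the next iteration divides g by itself
          simp only [if_pos hsq]
          have hodd' : g = 2 ∨ g % 2 = 1 := pvParity g p hp hodd hg hnd hns
          have hns' : pvNoSmall g g := pvNoSmall_self g p hp hg hnd hsq hns
          have hmg : PySem.Int.mod g g = 0 := (PySem.Int.mod_eq_zero_iff_dvd g g).2 dvd_rfl
          have hMA : pvMA g g < pvMA g p := by
            unfold pvMA pvTag
            rw [if_pos hmg, if_neg hm]
            omega
          exact ih g g n d steps fc (by omega) hodd' hns' (by omega) hfc
        · -- advance p
          simp only [if_neg hsq]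
          have h1 : p * p ≤ g := not_lt.mp hsq
          have hgodd := pvParity g p hp hodd hg hnd hns
          have htag2 : pvTag g p = 1 := by unfold pvTag; rw [if_neg hm]
          by_cases h2 : p = 2
          · subst h2
            norm_num
            have htag : pvTag g 3 ≤ 1 := by unfold pvTag; split <;> omega
            have hMA : pvMA g 3 < pvMA g 2 := by unfold pvMA; omega
            have hns' : pvNoSmall g 3 := fun q hq1 hq2 hdvd =>
              hnd ((show q = 2 by omega) ▸ hdvd)
            exact ih g 3 n d steps fc (by omega) (Or.inr (by norm_num)) hns' (by omega) hfc
          · have h3 : 3 ≤ p := by omega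
            have hodd' : p % 2 = 1 := hodd.resolve_left h2
            simp only [if_neg h2]
            have htag : pvTag g (p + 2) ≤ 1 := by unfold pvTag; split <;> omega
            have hple : p + 2 ≤ p * p := by nlinarith
            have hMA : pvMA g (p + 2) < pvMA g p := by unfold pvMA; omega
            have hns' : pvNoSmall g (p + 2) := by
              intro q hq1 hq2 hdvd
              by_cases hqp : q < p
              · exact hns q hq1 hqp hdvd
              · have hq : q = p ∨ q = p + 1 := by omega
                rcases hq with h | h
                · exact hnd (h ▸ hdvd)
                · have h2d : (2:Int) ∣ g := dvd_trans ⟨(p + 1) / 2, by omega⟩ (h ▸ hdvd)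
                  rcases hgodd with hg2 | hgo
                  · nlinarith
                  · obtain ⟨k, hk⟩ := h2d; omega
            exact ih g (p + 2) n d steps fc (by omega) (Or.inr (by omega)) hns' (by omega) hfc
    · -- g ≤ 1: the loop exits at once and the factor list is empty
      simp only [if_neg hg]
      rw [pvCanon_nil fc g hg]
      rfl

-- ===== B-side: B's pass renders the canonical factorization =====
lemma pvDivOut_spec : ∀ (F : Nat) (g n d p : Int) (steps : List String),
    pvDivOut F g n d p steps =
      ((pvMultOut F g p).2, pvDivAll n (pvMultOut F g p).1, pvDivAll d (pvMultOut F g p).1,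
        pvRender n d steps (pvMultOut F g p).1) := by
  intro F
  induction F with
  | zero => intro g n d p steps; rfl
  | succ F ih =>
    intro g n d p steps
    by_cases hm : PySem.Int.mod g p = 0
    · simp only [pvDivOut, pvMultOut, if_pos hm, ih]
      simp [pvDivAll, pvRender]
    · simp [pvDivOut, pvMultOut, hm, pvDivAll, pvRender]

lemma pvFold_spec (F : Nat) : ∀ (cs : List Int) (g n d : Int) (steps : List String),
    cs.foldl (fun (s : Int × Int × Int × List String) p => pvDivOut F s.1 s.2.1 s.2.2.1 p s.2.2.2) (g, n, d, steps)
      = ((pvPassL F cs g).2, pvDivAll n (pvPassL F cs g).1, pvDivAll d (pvPassL F cs g).1,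
          pvRender n d steps (pvPassL F cs g).1) := by
  intro cs
  induction cs with
  | nil => intro g n d steps; rfl
  | cons c cs ih =>
    intro g n d steps
    rw [List.foldl_cons, pvDivOut_spec, ih]
    simp only [pvPassL, pvDivAll, List.foldl_append, pvRender_append]

lemma pvMultOut_canon : ∀ (F : Nat) (g c : Int), 2 ≤ c → 1 ≤ g → pvNoSmall g c → g.toNat < F →
    1 ≤ (pvMultOut F g c).2 ∧ (pvMultOut F g c).2 ≤ g ∧ pvNoSmall (pvMultOut F g c).2 (c + 1) ∧
      ∀ fc : Nat, g.toNat < fc → pvCanon fc g = (pvMultOut F g c).1 ++ pvCanon fc (pvMultOut F g c).2 := by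
  intro F
  induction F with
  | zero => intro g c _ _ _ h; omega
  | succ F ih =>
    intro g c hc hg hns hF
    by_cases hm : PySem.Int.mod g c = 0
    · have hdvd : c ∣ g := (PySem.Int.mod_eq_zero_iff_dvd g c).1 hm
      have hgc : c ≤ g := Int.le_of_dvd (by omega) hdvd
      have hg2 : 1 < g := by omega
      obtain ⟨hlt, hnn⟩ := pv_fd_lt g c (by omega) hc
      have hg11 : 1 ≤ PySem.Int.floordiv g c := by
        rw [PySem.Int.le_floordiv_iff_mul_le (by omega)]
        omega
      have hns1 : pvNoSmall (PySem.Int.floordiv g c) c := pvNoSmall_div g c hm hns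
      obtain ⟨H1, H2, H3, H4⟩ := ih (PySem.Int.floordiv g c) c hc hg11 hns1 (by omega)
      simp only [pvMultOut, if_pos hm]
      refine ⟨H1, by omega, H3, ?_⟩
      intro fc hfc
      rcases fc with _ | fc
      · omega
      have hmf : pvMinFac g = c := pvMinFac_eq g c hc hg2 hdvd hns
      rw [pvCanon_cons fc g hg2, hmf, List.cons_append]
      have hrec := H4 fc (by omega)
      rw [hrec]
      have hr2 := pvCanon_congr fc (fc + 1) (pvMultOut F (PySem.Int.floordiv g c) c).2 (by omega) (by omega)
      rw [hr2]
    · simp only [pvMultOut, if_neg hm]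
      refine ⟨hg, le_refl g, ?_, fun fc _ => (List.nil_append _).symm⟩
      intro q h2 hq hdvd
      by_cases hqc : q < c
      · exact hns q h2 hqc hdvd
      · have : q = c := by omega
        exact hm ((PySem.Int.mod_eq_zero_iff_dvd g c).2 (this ▸ hdvd))

lemma pvPassL_canon (F : Nat) (s : Int) : ∀ (cs : List Int) (g lo : Int),
    2 ≤ lo → 1 ≤ g → g.toNat < F → pvNoSmall g lo →
    (∀ c ∈ cs, lo ≤ c ∧ c ≤ s) → cs.Pairwise (· < ·) →
    (∀ q : Int, pvPrime q → lo ≤ q → q ≤ s → q ∈ cs) →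
    1 ≤ (pvPassL F cs g).2 ∧ (pvPassL F cs g).2 ≤ g ∧ pvNoSmall (pvPassL F cs g).2 (s + 1) ∧
      ∀ fc : Nat, g.toNat < fc → pvCanon fc g = (pvPassL F cs g).1 ++ pvCanon fc (pvPassL F cs g).2 := by
  intro cs
  induction cs with
  | nil =>
    intro g lo hlo hg hF hns _ _ hcomp
    refine ⟨hg, le_refl g, ?_, fun fc _ => (List.nil_append _).symm⟩
    intro q h2 hq hdvd
    obtain ⟨r, hr, hrd, hrle⟩ := pvExists_prime_dvd q h2
    have hrg : r ∣ g := hrd.trans hdvd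
    by_cases hrlo : r < lo
    · exact hns r hr.1 hrlo hrg
    · exact absurd (hcomp r hr (by omega) (by omega)) (List.not_mem_nil)
  | cons c cs ih =>
    intro g lo hlo hg hF hns hmem hpw hcomp
    have hmemc := hmem c (List.mem_cons_self)
    have hc2 : 2 ≤ c := le_trans hlo hmemc.1
    have hpwc := List.pairwise_cons.mp hpw
    have hnsc : pvNoSmall g c := by
      intro q h2 hq hdvd
      obtain ⟨r, hr, hrd, hrle⟩ := pvExists_prime_dvd q h2
      have hrg : r ∣ g := hrd.trans hdvd
      by_cases hrlo : r < lo
      · exact hns r hr.1 hrlo hrg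
      · have hin := hcomp r hr (by omega) (by omega)
        rcases List.mem_cons.mp hin with h | h
        · omega
        · have := hpwc.1 r h
          omega
    obtain ⟨h1, hle, hns', hcanon⟩ := pvMultOut_canon F g c hc2 hg hnsc (by omega)
    obtain ⟨H1, H2, H3, H4⟩ := ih (pvMultOut F g c).2 (c + 1) (by omega) h1 (by omega) hns'
      (fun c' hc' => ⟨by have := hpwc.1 c' hc'; omega, (hmem c' (List.mem_cons_of_mem c hc')).2⟩)
      hpwc.2
      (fun q hq hq1 hq2 => by
        have hin := hcomp q hq (by omega) hq2
        rcases List.mem_cons.mp hin with h | h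
        · omega
        · exact h)
    simp only [pvPassL]
    refine ⟨H1, le_trans H2 hle, H3, ?_⟩
    intro fc hfc
    rw [hcanon fc hfc, H4 fc (by omega), List.append_assoc]

-- properties of B's prime list
lemma pvPrimesUpto_mem_bounds (s c : Int) (h : c ∈ pvPrimesUpto s) : 2 ≤ c ∧ c ≤ s := by
  have h1 := (List.mem_filter.mp h).1
  rw [PySem.List.mem_pyRange_one] at h1
  omega

lemma pvPrimesUpto_pairwise (s : Int) : (pvPrimesUpto s).Pairwise (· < ·) :=
  List.Pairwise.filter _ (PySem.List.pairwise_lt_pyRange_one (a := 2) (b := s + 1))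

lemma pvPrimesUpto_complete (s q : Int) (hq : pvPrime q) (hqs : q ≤ s) : q ∈ pvPrimesUpto s := by
  unfold pvPrimesUpto
  rw [List.mem_filter]
  refine ⟨PySem.List.mem_pyRange_one.mpr ⟨hq.1, by omega⟩, ?_⟩
  rw [List.all_eq_true]
  intro r hr
  rw [PySem.List.mem_pyRange_one] at hr
  have h2q : 2 ≤ q := hq.1
  have hrq : r < q := by
    have hx := Nat.sqrt_lt_self (n := q.toNat) (by omega)
    unfold pvIsqrt at hr
    omega
  have hnd := hq.2 r hr.1 hrq
  simp only [bne_iff_ne, ne_eq]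
  intro h
  exact hnd ((PySem.Int.mod_eq_zero_iff_dvd q r).1 h)

-- ===== VERDICT (by name: the statement is the Claim_ definition above) =====
theorem get_simplification_steps_spec : Claim_equal_get_simplification_steps := by
  intro n d _
  unfold Spec_get_simplification_steps get_simplification_steps get_simplification_steps_alt
  by_cases hd : d = 0
  · simp [hd]
  · simp only [if_neg hd, get_gcd]
    set g : Int := (Int.gcd n d : Int) with hgdef
    have hg1 : 1 ≤ g := by
      have hne : Int.gcd n d ≠ 0 := fun h => hd ((Int.gcd_eq_zero_iff.mp h).2)
      have : 0 < Int.gcd n d := Nat.pos_of_ne_zero hne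
      omega
    rw [pvLoopA_canon (5 * g.toNat + 2) g 2 n d _ (g.toNat + 1) (by omega) (Or.inl rfl)
        (fun q h2 hq => absurd hq (by omega))
        (by unfold pvMA pvTag; split <;> omega) (by omega)]
    rw [pvFold_spec (g.toNat + 1) (pvPrimesUpto (pvIsqrt g)) g n d _]
    obtain ⟨hb1, hble, hbns, hbcanon⟩ := pvPassL_canon (g.toNat + 1) (pvIsqrt g)
      (pvPrimesUpto (pvIsqrt g)) g 2 (by omega) hg1 (by omega)
      (fun q h2 hq => absurd hq (by omega))
      (fun c hc => pvPrimesUpto_mem_bounds _ c hc)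
      (pvPrimesUpto_pairwise _)
      (fun q hq _ hqs => pvPrimesUpto_complete _ q hq hqs)
    have hsq : (pvPassL (g.toNat + 1) (pvPrimesUpto (pvIsqrt g)) g).2 <
        (pvIsqrt g + 1) * (pvIsqrt g + 1) := by
      have hgb : g < (pvIsqrt g + 1) * (pvIsqrt g + 1) := by
        have hx := Nat.lt_succ_sqrt g.toNat
        have hcast : g = (g.toNat : Int) := (Int.toNat_of_nonneg (by omega)).symm
        unfold pvIsqrt
        rw [hcast]
        exact_mod_cast hx
      linarith
    have hleft := pvCanon_leftover (g.toNat + 1) _ (pvIsqrt g + 1)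
      (by unfold pvIsqrt; positivity) hbns hsq (by omega)
    rw [hbcanon (g.toNat + 1) (by omega), hleft]
    by_cases hgl : 1 < (pvPassL (g.toNat + 1) (pvPrimesUpto (pvIsqrt g)) g).2
    · rw [if_pos hgl]
      simp only [if_pos hgl]
      rw [pvRender_append]
      simp only [pvRender]
    · rw [if_neg hgl]
      simp only [if_neg hgl, List.append_nil]
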